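-- pv_equiv track=rewrite | github.com/Bobtheotherone/Electrodrive | electrodrive/researched/spec_inspector.py | _types_count
-- ===== SOURCE A (Python) =====
-- from typing import Any, Dict, Mapping, Optional, Tuple, List, Union
--
-- def _types_count(objs: List[Dict[str, Any]]) -> Dict[str, int]:
--     out: Dict[str, int] = {}
--     for o in objs:
--         try:
--             t = o.get("type")
--             k = str(t) if t is not None and str(t).strip() else "unknown"
--         except Exception:
--             k = "unknown"
--         out[k] = out.get(k, 0) + 1
--     return dict(sorted(out.items(), key=lambda kv: kv[0]))
-- ===== SOURCE B (Python) =====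
-- from itertools import groupby
-- from typing import Any, Dict, List
--
--
-- def _types_count(objs: List[Dict[str, Any]]) -> Dict[str, int]:
--     def key(o):
--         try:
--             t = o.get("type")
--             return str(t) if t is not None and str(t).strip() else "unknown"
--         except Exception:
--             return "unknown"
--
--     return {k: sum(1 for _ in g) for k, g in groupby(sorted(key(o) for o in objs))}
-- ===== Notes on version B (the rewrite author's own statement) =====
-- stated objective: alternative
-- what changed: Instead of incrementing a counting dict per object and then sorting its items, B projects every object to its count-key, sorts that key list once, and counts each run with itertools.groupby, building the dict directly in ascending key order.
import Mathlib
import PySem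

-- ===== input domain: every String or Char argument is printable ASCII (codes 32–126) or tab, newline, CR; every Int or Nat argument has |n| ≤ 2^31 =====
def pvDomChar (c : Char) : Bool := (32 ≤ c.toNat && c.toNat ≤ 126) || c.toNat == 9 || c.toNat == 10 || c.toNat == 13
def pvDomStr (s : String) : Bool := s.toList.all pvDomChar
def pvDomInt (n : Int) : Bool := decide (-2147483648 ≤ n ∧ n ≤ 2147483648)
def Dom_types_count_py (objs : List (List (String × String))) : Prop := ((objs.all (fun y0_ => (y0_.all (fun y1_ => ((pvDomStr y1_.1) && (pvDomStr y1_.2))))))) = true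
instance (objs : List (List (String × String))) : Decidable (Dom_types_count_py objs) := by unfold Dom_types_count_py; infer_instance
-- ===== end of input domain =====

-- B replaces A's count-into-a-dict-then-sort-items strategy by a project-to-keys, sort, group-count pass (alternative decomposition, same result).


-- ===== PORT A =====
-- for o in objs: t = o.get("type"); k = str(t) if t is not None and str(t).strip() else "unknown";
-- out[k] = out.get(k, 0) + 1; finally dict(sorted(out.items(), key=kv[0])).
-- (values are strings under the type convention, so str(t) = t and the try/except never fires)
def types_count_py (objs : List (List (String × String))) : List (String × Int) :=
  let out : PySem.Dict String Int :=
    objs.foldl (fun out o =>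
      let t := (PySem.Dict.ofList o).get? "type"
      let k : String :=
        match t with
        | some tv => if PySem.Str.strip tv ≠ "" then tv else "unknown"
        | none => "unknown"
      out.insert k (out.getD k 0 + 1)) PySem.Dict.empty
  PySem.List.sorted out.items (fun kv => kv.1) false

-- ===== PORT B =====
-- key(o) of Source B
def pvKeyOf (o : List (String × String)) : String :=
  match (PySem.Dict.ofList o).get? "type" with
  | some t => if PySem.Str.strip t ≠ "" then t else "unknown"
  | none => "unknown"

-- groupby over a sorted key list: one pair (key, run length) per run
def pvGroup : List String → List (String × Int)
  | [] => []
  | k :: rest =>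
    (k, 1 + ((rest.takeWhile (fun x => x == k)).length : Int)) ::
      pvGroup (rest.dropWhile (fun x => x == k))
termination_by s => s.length
decreasing_by
  simpa using Nat.lt_succ_of_le (List.length_dropWhile_le _ rest)

def types_count_py_alt (objs : List (List (String × String))) : List (String × Int) :=
  pvGroup (PySem.List.sorted (objs.map pvKeyOf) (fun x => x) false)

-- ===== PRECONDITION & SPEC =====
def Spec_types_count_py (objs : List (List (String × String))) (out : List (String × Int)) : Prop := out = types_count_py_alt objs
instance (objs : List (List (String × String))) (out : List (String × Int)) : Decidable (Spec_types_count_py objs out) := by unfold Spec_types_count_py; infer_instance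

-- ===== CLAIM (what is proved, stated in full; the proofs are below) =====
def Claim_equal_types_count_py : Prop := ∀ (objs : List (List (String × String))), Dom_types_count_py objs → Spec_types_count_py objs (types_count_py objs)

-- ===== LEMMAS AND PROOFS =====

-- A's counting loop is Counter(keys)
lemma foldA_eq_counter (objs : List (List (String × String))) :
    objs.foldl (fun out o =>
      let t := (PySem.Dict.ofList o).get? "type"
      let k : String :=
        match t with
        | some tv => if PySem.Str.strip tv ≠ "" then tv else "unknown"
        | none => "unknown"
      out.insert k (out.getD k 0 + 1)) PySem.Dict.empty
      = PySem.Dict.counter (objs.map pvKeyOf) := by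
  rw [← PySem.Dict.foldl_insert_getD_add_one_eq_counter, List.foldl_map]
  rfl

-- on a ≤-sorted list, pvGroup produces (key, count) pairs over a strictly increasing key list ds
lemma pvGroup_sorted_spec (s : List String) (hs : s.Pairwise (· ≤ ·)) :
    ∃ ds : List String, pvGroup s = ds.map (fun k => (k, (List.count k s : Int))) ∧
      ds.Pairwise (· < ·) ∧ (∀ x, x ∈ ds ↔ x ∈ s) := by
  fun_induction pvGroup s with
  | case1 => exact ⟨[], by simp, by simp, by simp⟩
  | case2 k rest ih =>
    rw [List.pairwise_cons] at hs
    obtain ⟨h1, h2⟩ := hs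
    have hsub : List.Sublist (rest.dropWhile (fun x => x == k)) rest := List.dropWhile_sublist _
    have h2' : (rest.dropWhile (fun x => x == k)).Pairwise (· ≤ ·) := h2.sublist hsub
    -- every key of the tail group is strictly greater than k
    have hgt : ∀ x ∈ rest.dropWhile (fun x => x == k), k < x := by
      intro x hx
      have hne : rest.dropWhile (fun x => x == k) ≠ [] := List.ne_nil_of_mem hx
      obtain ⟨hd, tl, he⟩ := List.exists_cons_of_ne_nil hne
      have hhd : (hd == k) = false := by
        have := List.head_dropWhile_not (fun x => x == k) hne
        simpa [he] using this
      have hkhd : k ≤ hd := h1 hd (hsub.subset (by simp [he]))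
      have hkhd' : k < hd := lt_of_le_of_ne hkhd (fun h => by simp [h.symm] at hhd)
      rw [he] at hx h2'
      rcases List.mem_cons.mp hx with h | h
      · exact h ▸ hkhd'
      · exact lt_of_lt_of_le hkhd' ((List.pairwise_cons.mp h2').1 x h)
    have hrun : ∀ x ∈ rest.takeWhile (fun x => x == k), x = k := by
      intro x hx
      have := List.mem_takeWhile_imp hx
      exact eq_of_beq this
    obtain ⟨ds, hg, hlt, hmem⟩ := ih h2'
    have hsplit : rest.takeWhile (fun x => x == k) ++ rest.dropWhile (fun x => x == k) = rest :=
      List.takeWhile_append_dropWhile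
    -- counts
    have hck : List.count k (k :: rest) = 1 + (rest.takeWhile (fun x => x == k)).length := by
      have hc1 : List.count k (rest.takeWhile (fun x => x == k)) = (rest.takeWhile (fun x => x == k)).length :=
        List.count_eq_length.mpr (fun x hx => by rw [hrun x hx])
      have hc2 : List.count k (rest.dropWhile (fun x => x == k)) = 0 :=
        List.count_eq_zero.mpr (fun h => lt_irrefl k (hgt k h))
      have hrestc : List.count k rest = (rest.takeWhile (fun x => x == k)).length := by
        conv_lhs => rw [← hsplit]
        rw [List.count_append, hc1, hc2]
        omega
      rw [List.count_cons_self, hrestc]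
      omega
    have htail : ∀ k' ∈ ds, List.count k' (rest.dropWhile (fun x => x == k)) = List.count k' (k :: rest) := by
      intro k' hk'
      have hk'mem : k' ∈ rest.dropWhile (fun x => x == k) := (hmem k').mp hk'
      have hkk' : k < k' := hgt k' hk'mem
      have hc1 : List.count k' (rest.takeWhile (fun x => x == k)) = 0 :=
        List.count_eq_zero.mpr (fun h => absurd (hrun k' h) hkk'.ne')
      rw [show List.count k' (k :: rest) = List.count k' rest by
        simp [hkk'.ne]]
      conv_rhs => rw [← hsplit]
      rw [List.count_append, hc1]
      omega
    refine ⟨k :: ds, ?_, ?_, ?_⟩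
    · rw [List.map_cons, hg, hck]
      refine congrArg₂ List.cons (by push_cast; ring_nf) ?_
      exact List.map_congr_left (fun k' hk' => by rw [htail k' hk'])
    · exact List.pairwise_cons.mpr ⟨fun y hy => hgt y ((hmem y).mp hy), hlt⟩
    · intro x
      simp only [List.mem_cons, hmem]
      constructor
      · rintro (rfl | h)
        · exact Or.inl rfl
        · exact Or.inr (hsub.subset h)
      · rintro (rfl | h)
        · exact Or.inl rfl
        · rw [← hsplit] at h
          rcases List.mem_append.mp h with h | h
          · exact Or.inl (hrun x h)
          · exact Or.inr h

theorem types_count_py_spec : Claim_equal_types_count_py := by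
  intro objs _
  unfold Spec_types_count_py
  have hs : (PySem.List.sorted (objs.map pvKeyOf) (fun x => x) false).Pairwise (· ≤ ·) :=
    PySem.List.sorted_pairwise (objs.map pvKeyOf) (fun x => x)
  obtain ⟨ds, hg, hlt, hmem⟩ := pvGroup_sorted_spec _ hs
  have hcnt : ∀ k, List.count k (PySem.List.sorted (objs.map pvKeyOf) (fun x => x) false)
      = List.count k (objs.map pvKeyOf) :=
    fun k => (PySem.List.sorted_perm (objs.map pvKeyOf) (fun x => x) false).count_eq k
  have hB : types_count_py_alt objs
      = ds.map (fun k => (k, (List.count k (objs.map pvKeyOf) : Int))) := by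
    unfold types_count_py_alt
    rw [hg]
    exact List.map_congr_left (fun k _ => by rw [hcnt])
  have hA : types_count_py objs
      = PySem.List.sorted ((PySem.Set.ofList (objs.map pvKeyOf)).map
          (fun k => (k, (List.count k (objs.map pvKeyOf) : Int)))) (fun kv => kv.1) false := by
    simp only [types_count_py]
    rw [foldA_eq_counter, PySem.Dict.items_counter]
  have hnd : ds.Nodup := hlt.imp (fun h => ne_of_lt h)
  have hperm : ds.Perm (PySem.Set.ofList (objs.map pvKeyOf)) :=
    (List.perm_ext_iff_of_nodup hnd (PySem.Set.nodup_ofList _)).mpr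
      (fun x => by rw [hmem, PySem.List.mem_sorted, PySem.Set.mem_ofList])
  have hpw : (ds.map (fun k => (k, (List.count k (objs.map pvKeyOf) : Int)))).Pairwise
      (fun a b => a.1 < b.1) := List.pairwise_map.mpr hlt
  rw [hA, hB]
  exact (PySem.List.sorted_eq_of_perm_of_pairwise_lt _ _ (fun kv : String × Int => kv.1) (hperm.map _) hpw)
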